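-- pv_equiv track=rewrite | github.com/kyoongdev/algorithm | programmers/체육복.py | solution
-- ===== SOURCE A (Python) =====
-- def solution(n, lost, reserve):
--     lost.sort()
--     reserve.sort()
--     lostCopy = lost.copy()
--     reserveCopy = reserve.copy()
--     lost = [x for x in lost if x not in reserveCopy]
--     reserve = [x for x in reserve if x not in lostCopy]
--
--     lostPeopleLength = len(lost)
--
--     for lostPeople in lost:
--
--         matches = [x for x in reserve if x == lostPeople - 1 or x == lostPeople + 1]
--
--         if len(matches) > 0:
--             minValue = min(matches)
--             reserve.remove(minValue)
--             lostPeopleLength -= 1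
--
--     return n - lostPeopleLength
-- ===== SOURCE B (Python) =====
-- def solution(n, lost, reserve):
--     lost.sort()
--     reserve.sort()
--     lostSet, reserveSet = set(lost), set(reserve)
--     need = [x for x in lost if x not in reserveSet]
--     avail = [x for x in reserve if x not in lostSet]
--     missing = 0
--     j = 0
--     for x in need:
--         while j < len(avail) and avail[j] < x - 1:
--             j += 1
--         if j < len(avail) and avail[j] <= x + 1:
--             j += 1
--         else:
--             missing += 1
--     return n - missing
-- ===== Notes on version B (the rewrite author's own statement) =====
-- stated objective: faster
-- what changed: Replaces A's per-student search of the reserve list (matches filter, min, list.remove) by a single two-pointer merge over the two sorted leftover lists: one index sweeps the available reserves forward, matching or skipping each, so no element is ever scanned twice.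
import Mathlib
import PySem

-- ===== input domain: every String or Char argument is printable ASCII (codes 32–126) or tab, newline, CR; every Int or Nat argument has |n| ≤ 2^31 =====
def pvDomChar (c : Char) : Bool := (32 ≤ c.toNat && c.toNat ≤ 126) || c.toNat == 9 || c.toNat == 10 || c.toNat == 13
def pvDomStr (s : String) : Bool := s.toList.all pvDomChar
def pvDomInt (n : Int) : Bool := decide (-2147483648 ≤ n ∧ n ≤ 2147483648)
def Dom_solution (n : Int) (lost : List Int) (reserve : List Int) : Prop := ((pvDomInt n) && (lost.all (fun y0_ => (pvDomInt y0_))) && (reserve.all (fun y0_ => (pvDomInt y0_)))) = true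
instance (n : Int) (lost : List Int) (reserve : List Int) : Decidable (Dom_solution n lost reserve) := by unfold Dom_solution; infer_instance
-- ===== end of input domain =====

-- B replaces A's per-student scans of the reserve list (matches filter, min, list.remove) by a
-- single two-pointer merge over the two sorted leftover lists; same return values as A; both A
-- and B sort `lost` and `reserve` in place (same side effect).


-- ===== PORT A =====
-- body of A's 'for lostPeople in lost' loop; state = (reserve, lostPeopleLength)
def pvStepA (st : List Int × Int) (lostPeople : Int) : List Int × Int :=
  let matchList := st.1.filter (fun x => x == lostPeople - 1 || x == lostPeople + 1)
  if matchList.length > 0 then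
    match PySem.List.min? matchList (fun x => x) with
    | some minValue =>
        -- reserve.remove(minValue): minValue ∈ matchList ⊆ reserve, so remove? never fails; getD only makes it total
        ((PySem.List.remove? st.1 minValue).getD st.1, st.2 - 1)
    | none => st   -- unreachable: matchList ≠ []
  else st

def solution (n : Int) (lost : List Int) (reserve : List Int) : Int :=
  let lostSorted := PySem.List.sorted lost (fun x => x) false
  let reserveSorted := PySem.List.sorted reserve (fun x => x) false
  let lostCopy := lostSorted
  let reserveCopy := reserveSorted
  let lost2 := lostSorted.filter (fun x => !reserveCopy.contains x)
  let reserve2 := reserveSorted.filter (fun x => !lostCopy.contains x)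
  n - (lost2.foldl pvStepA (reserve2, (lost2.length : Int))).2

-- ===== PORT B =====
-- B's inner 'while j < len(avail) and avail[j] < x - 1: j += 1'
-- (the short-circuit 'and' is the conjunction guard; getD's default is never read since j < len comes first)
def pvSkip (avail : List Int) (x : Int) (j : Nat) : Nat :=
  if h : j < avail.length ∧ avail.getD j 0 < x - 1 then pvSkip avail x (j + 1) else j
termination_by avail.length - j
decreasing_by omega

-- body of B's 'for x in need' loop; state = (j, missing)
def pvStepB (avail : List Int) (st : Nat × Int) (x : Int) : Nat × Int :=
  let j := pvSkip avail x st.1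
  if j < avail.length ∧ avail.getD j 0 ≤ x + 1 then (j + 1, st.2) else (j, st.2 + 1)

def solution_alt (n : Int) (lost : List Int) (reserve : List Int) : Int :=
  let lostSorted := PySem.List.sorted lost (fun x => x) false
  let reserveSorted := PySem.List.sorted reserve (fun x => x) false
  let lset := PySem.Set.ofList lostSorted
  let rset := PySem.Set.ofList reserveSorted
  let need := lostSorted.filter (fun x => !(PySem.Set.contains rset x))
  let avail := reserveSorted.filter (fun x => !(PySem.Set.contains lset x))
  n - (need.foldl (pvStepB avail) (0, 0)).2

-- ===== PRECONDITION & SPEC =====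
def Spec_solution (n : Int) (lost : List Int) (reserve : List Int) (out : Int) : Prop := out = solution_alt n lost reserve
instance (n : Int) (lost : List Int) (reserve : List Int) (out : Int) : Decidable (Spec_solution n lost reserve out) := by unfold Spec_solution; infer_instance

-- ===== CLAIM (what is proved, stated in full; the proofs are below) =====
def Claim_equal_solution : Prop := ∀ (n : Int) (lost : List Int) (reserve : List Int), Dom_solution n lost reserve → Spec_solution n lost reserve (solution n lost reserve)

-- ===== LEMMAS AND PROOFS =====

lemma pv_contains_ofList (l : List Int) (x : Int) :
    PySem.Set.contains (PySem.Set.ofList l) x = l.contains x := by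
  simp [PySem.Set.contains, PySem.Set.mem_ofList]

lemma pv_min_low (res : List Int) (x : Int) (h : x - 1 ∈ res) :
    PySem.List.min? (res.filter (fun y => y == x - 1 || y == x + 1)) (fun y => y) = some (x - 1) := by
  have hmem : x - 1 ∈ res.filter (fun y => y == x - 1 || y == x + 1) :=
    List.mem_filter.mpr ⟨h, by simp⟩
  cases hmin : PySem.List.min? (res.filter (fun y => y == x - 1 || y == x + 1)) (fun y => y) with
  | none =>
    exact absurd ((PySem.List.min?_eq_none_iff _ _).mp hmin ▸ hmem) (List.not_mem_nil)
  | some m =>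
    have hm := PySem.List.min?_mem hmin
    have hle := PySem.List.min?_isMin hmin (x - 1) hmem
    have := (List.mem_filter.mp hm).2
    simp only [Bool.or_eq_true, beq_iff_eq] at this
    rcases this with rfl | rfl
    · rfl
    · omega

lemma pv_min_high (res : List Int) (x : Int) (h1 : x - 1 ∉ res) (h2 : x + 1 ∈ res) :
    PySem.List.min? (res.filter (fun y => y == x - 1 || y == x + 1)) (fun y => y) = some (x + 1) := by
  have hmem : x + 1 ∈ res.filter (fun y => y == x - 1 || y == x + 1) :=
    List.mem_filter.mpr ⟨h2, by simp⟩
  cases hmin : PySem.List.min? (res.filter (fun y => y == x - 1 || y == x + 1)) (fun y => y) with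
  | none =>
    exact absurd ((PySem.List.min?_eq_none_iff _ _).mp hmin ▸ hmem) (List.not_mem_nil)
  | some m =>
    have hm := PySem.List.min?_mem hmin
    have hres := (List.mem_filter.mp hm).1
    have := (List.mem_filter.mp hm).2
    simp only [Bool.or_eq_true, beq_iff_eq] at this
    rcases this with rfl | rfl
    · exact absurd hres h1
    · rfl

lemma pv_getD (avail : List Int) (j : Nat) (h : j < avail.length) :
    avail.getD j 0 = avail[j] := by
  simp [List.getD, List.getElem?_eq_getElem h]

lemma pvSkip_le (avail : List Int) (x : Int) : ∀ j, j ≤ avail.length → pvSkip avail x j ≤ avail.length := by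
  intro j
  induction j using pvSkip.induct avail x with
  | case1 j h ih => intro _; rw [pvSkip, dif_pos h]; exact ih (by omega)
  | case2 j h => intro hj; rw [pvSkip, dif_neg h]; exact hj

lemma pvSkip_stop (avail : List Int) (x : Int) : ∀ j,
    ¬ (pvSkip avail x j < avail.length ∧ avail.getD (pvSkip avail x j) 0 < x - 1) := by
  intro j
  induction j using pvSkip.induct avail x with
  | case1 j h ih =>
    have e : pvSkip avail x j = pvSkip avail x (j + 1) := by rw [pvSkip, dif_pos h]
    rw [e]; exact ih
  | case2 j h =>
    have e : pvSkip avail x j = j := by rw [pvSkip, dif_neg h]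
    rw [e]; exact h

lemma pvSkip_drop (avail : List Int) (x : Int) : ∀ j,
    avail.drop (pvSkip avail x j) = (avail.drop j).dropWhile (fun y => decide (y < x - 1)) := by
  intro j
  induction j using pvSkip.induct avail x with
  | case1 j h ih =>
    rw [pvSkip, dif_pos h, ih, List.drop_eq_getElem_cons h.1, List.dropWhile_cons]
    have := h.2
    rw [pv_getD avail j h.1] at this
    simp [this]
  | case2 j h =>
    rw [pvSkip, dif_neg h]
    by_cases hlen : j < avail.length
    · have hge : ¬ avail.getD j 0 < x - 1 := fun hc => h ⟨hlen, hc⟩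
      rw [pv_getD avail j hlen] at hge
      rw [List.drop_eq_getElem_cons hlen, List.dropWhile_cons]
      simp [hge]
    · have : avail.drop j = [] := List.drop_eq_nil_of_le (by omega)
      simp [this]

-- simulation invariant: A's remaining reserve list is always (already-skipped small junk) ++ avail.drop j
lemma pv_loop (avail : List Int) (hs : avail.Pairwise (· ≤ ·)) :
    ∀ (l junk : List Int) (j : Nat) (a m : Int),
      l.Pairwise (· ≤ ·) →
      (∀ x ∈ l, x ∉ avail) →
      (∀ y ∈ junk, ∀ x ∈ l, y < x - 1) →
      j ≤ avail.length →
      (l.foldl pvStepA (junk ++ avail.drop j, a)).2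
        = a + ((l.foldl (pvStepB avail) (j, m)).2 - m) - l.length := by
  intro l
  induction l with
  | nil => intro junk j a m _ _ _ _; simp
  | cons x t ih =>
    intro junk j a m hsort hdisj hjunk hj
    have hxt : ∀ x' ∈ t, x ≤ x' := fun x' hx' => List.rel_of_pairwise_cons hsort hx'
    have hsort' : t.Pairwise (· ≤ ·) := hsort.of_cons
    have hdisj' : ∀ x' ∈ t, x' ∉ avail := fun x' hx' => hdisj x' (List.mem_cons_of_mem _ hx')
    set j' := pvSkip avail x j with hj'
    have hj'le : j' ≤ avail.length := pvSkip_le avail x j hj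
    have hdropj' : avail.drop j' = (avail.drop j).dropWhile (fun y => decide (y < x - 1)) :=
      pvSkip_drop avail x j
    set junk' := junk ++ (avail.drop j).takeWhile (fun y => decide (y < x - 1)) with hjunk'def
    have hres : junk ++ avail.drop j = junk' ++ avail.drop j' := by
      rw [hjunk'def, hdropj', List.append_assoc, List.takeWhile_append_dropWhile]
    have hjunk' : ∀ y ∈ junk', ∀ x' ∈ x :: t, y < x' - 1 := by
      intro y hy x' hx'
      have hxx' : x ≤ x' := by
        rcases List.mem_cons.mp hx' with rfl | hx'; · exact le_refl _
        · exact hxt x' hx'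
      rcases List.mem_append.mp hy with hy | hy
      · have := hjunk y hy x' hx'; omega
      · have := List.mem_takeWhile_imp hy
        simp only [decide_eq_true_eq] at this; omega
    have hjunk'x : ∀ y ∈ junk', y < x - 1 := fun y hy => hjunk' y hy x (List.mem_cons_self)
    have hjunk't : ∀ y ∈ junk', ∀ x' ∈ t, y < x' - 1 :=
      fun y hy x' hx' => hjunk' y hy x' (List.mem_cons_of_mem _ hx')
    rw [List.foldl_cons, List.foldl_cons, hres]
    by_cases hlt : j' < avail.length
    · have hdcons : avail.drop j' = avail[j'] :: avail.drop (j' + 1) := List.drop_eq_getElem_cons hlt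
      set v := avail[j'] with hv
      have hgetD : avail.getD j' 0 = v := pv_getD avail j' hlt
      have hvge : ¬ v < x - 1 := by
        intro hc
        exact pvSkip_stop avail x j ⟨hj' ▸ hlt, by rw [← hj', hgetD]; exact hc⟩
      have hvrest : ∀ y ∈ avail.drop (j' + 1), v ≤ y := by
        have hp : (avail.drop j').Pairwise (· ≤ ·) := hs.sublist (List.drop_sublist _ _)
        rw [hdcons] at hp
        exact fun y hy => List.rel_of_pairwise_cons hp hy
      by_cases hvle : v ≤ x + 1
      · -- matched: v = x - 1 or v = x + 1 (v ≠ x since x ∉ avail)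
        have hvne : v ≠ x := by
          intro hvx
          exact hdisj x (List.mem_cons_self) (hvx ▸ avail.getElem_mem hlt)
        have hstepB : pvStepB avail (j, m) x = (j' + 1, m) := by
          simp only [pvStepB, ← hj']
          rw [if_pos ⟨hlt, by rw [hgetD]; exact hvle⟩]
        have hAres : pvStepA (junk' ++ avail.drop j', a) x
            = (junk' ++ avail.drop (j' + 1), a - 1) := by
          have hvmem : v ∈ junk' ++ avail.drop j' := by
            rw [hdcons]; exact List.mem_append_right _ (List.mem_cons_self)
          have hvnjunk : v ∉ junk' := fun hc => hvge (by have := hjunk'x v hc; omega)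
          have herase : (junk' ++ avail.drop j').erase v = junk' ++ avail.drop (j' + 1) := by
            rw [List.erase_append_right _ (fun hc => hvnjunk hc), hdcons, List.erase_cons_head]
          by_cases hlow : v = x - 1
          · have hmemres : x - 1 ∈ junk' ++ avail.drop j' := hlow ▸ hvmem
            have hmin := pv_min_low (junk' ++ avail.drop j') x hmemres
            have hfmem : x - 1 ∈ (junk' ++ avail.drop j').filter
                (fun y => y == x - 1 || y == x + 1) := List.mem_filter.mpr ⟨hmemres, by simp⟩
            have hflen : 0 < ((junk' ++ avail.drop j').filter
                (fun y => y == x - 1 || y == x + 1)).length :=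
              List.length_pos_iff.mpr (List.ne_nil_of_mem hfmem)
            have herase' : (junk' ++ avail.drop j').erase (x - 1)
                = junk' ++ avail.drop (j' + 1) := hlow ▸ herase
            simp only [pvStepA, hmin]
            rw [if_pos hflen]
            simp only [PySem.List.remove?_eq_some_erase _ _ hmemres, Option.getD_some, herase']
          · have hvhigh : v = x + 1 := by omega
            have hnlow : x - 1 ∉ junk' ++ avail.drop j' := by
              intro hc
              rcases List.mem_append.mp hc with hc | hc
              · have := hjunk'x _ hc; omega
              · rw [hdcons] at hc
                rcases List.mem_cons.mp hc with hc | hc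
                · omega
                · have := hvrest _ hc; omega
            have hmemres : x + 1 ∈ junk' ++ avail.drop j' := hvhigh ▸ hvmem
            have hmin := pv_min_high (junk' ++ avail.drop j') x hnlow hmemres
            have hfmem : x + 1 ∈ (junk' ++ avail.drop j').filter
                (fun y => y == x - 1 || y == x + 1) := List.mem_filter.mpr ⟨hmemres, by simp⟩
            have hflen : 0 < ((junk' ++ avail.drop j').filter
                (fun y => y == x - 1 || y == x + 1)).length :=
              List.length_pos_iff.mpr (List.ne_nil_of_mem hfmem)
            have herase' : (junk' ++ avail.drop j').erase (x + 1)
                = junk' ++ avail.drop (j' + 1) := hvhigh ▸ herase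
            simp only [pvStepA, hmin]
            rw [if_pos hflen]
            simp only [PySem.List.remove?_eq_some_erase _ _ hmemres, Option.getD_some, herase']
        rw [hstepB, hAres, ih junk' (j' + 1) (a - 1) m hsort' hdisj' hjunk't (by omega)]
        push_cast [List.length_cons]
        ring
      · -- no match: v > x + 1
        have hstepB : pvStepB avail (j, m) x = (j', m + 1) := by
          simp only [pvStepB, ← hj']
          rw [if_neg (fun hc => hvle (by rw [← hgetD]; exact hc.2))]
        have hfnil : (junk' ++ avail.drop j').filter
            (fun y => y == x - 1 || y == x + 1) = [] := by
          rw [List.filter_eq_nil_iff]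
          intro y hy
          simp only [Bool.or_eq_true, beq_iff_eq, not_or]
          rcases List.mem_append.mp hy with hy | hy
          · have := hjunk'x _ hy; omega
          · rw [hdcons] at hy
            rcases List.mem_cons.mp hy with rfl | hy
            · omega
            · have := hvrest _ hy; omega
        have hAres : pvStepA (junk' ++ avail.drop j', a) x = (junk' ++ avail.drop j', a) := by
          simp [pvStepA, hfnil]
        rw [hstepB, hAres, ih junk' j' a (m + 1) hsort' hdisj' hjunk't hj'le]
        push_cast [List.length_cons]
        ring
    · -- j' = len(avail): drop j' = [], no match
      have hdnil : avail.drop j' = [] := List.drop_eq_nil_of_le (by omega)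
      have hstepB : pvStepB avail (j, m) x = (j', m + 1) := by
        simp only [pvStepB, ← hj']
        rw [if_neg (fun hc => hlt hc.1)]
      have hfnil : (junk' ++ avail.drop j').filter
          (fun y => y == x - 1 || y == x + 1) = [] := by
        rw [hdnil, List.append_nil, List.filter_eq_nil_iff]
        intro y hy
        simp only [Bool.or_eq_true, beq_iff_eq, not_or]
        have := hjunk'x _ hy; omega
      have hAres : pvStepA (junk' ++ avail.drop j', a) x = (junk' ++ avail.drop j', a) := by
        simp [pvStepA, hfnil]
      rw [hstepB, hAres, ih junk' j' a (m + 1) hsort' hdisj' hjunk't hj'le]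
      push_cast [List.length_cons]
      ring

-- ===== VERDICT (by name: the statement is the Claim_ definition above) =====
theorem solution_spec : Claim_equal_solution := by
  intro n lost reserve _
  unfold Spec_solution solution solution_alt
  simp only [pv_contains_ofList]
  set lostS := PySem.List.sorted lost (fun x => x) false with hL
  set reserveS := PySem.List.sorted reserve (fun x => x) false with hR
  set lost2 := lostS.filter (fun x => !reserveS.contains x) with h2
  set reserve2 := reserveS.filter (fun x => !lostS.contains x) with h3
  have hsR : reserve2.Pairwise (· ≤ ·) :=
    (PySem.List.sorted_pairwise reserve (fun x => x)).filter _
  have hsL : lost2.Pairwise (· ≤ ·) :=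
    (PySem.List.sorted_pairwise lost (fun x => x)).filter _
  have hdisj : ∀ x ∈ lost2, x ∉ reserve2 := by
    intro x hx hc
    have h1 := (List.mem_filter.mp hx).2
    have h2 := (List.mem_filter.mp hc).1
    simp only [Bool.not_eq_true', ← Bool.not_eq_true, List.contains_eq_mem,
      decide_eq_true_eq] at h1
    exact h1 (by simpa using h2)
  have := pv_loop reserve2 hsR lost2 [] 0 (lost2.length : Int) 0 hsL hdisj
    (by intro y hy; simp at hy) (by omega)
  simp only [List.nil_append, List.drop_zero] at this
  rw [this]
  ring
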